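-- pv_equiv track=rewrite | github.com/EladAriel/CS-Academic-Projects | Data Structures and Algorithms/Max_Min_Heap/helper_functions.py | get_min_child
-- ===== SOURCE A (Python) =====
-- def leftChild(i):
--     """
--     Args:
--         i (int): Index of the node.
--
--     Returns:
--         int: The position of the left child for node i.
--     """
--     return 2 * i + 1
--
-- def rightChild(i):
--     """
--     Args:
--         i (int): Index of the node.
--
--     Returns:
--         int: The position of the right child for node i.
--     """
--     return 2 * i + 2
--
-- def get_min_child(A, i, n):
--     """
--     Given a binary tree represented by a list A and an index i,
--     return the index of the minimum child or grandchild of node i.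
--
--     Args:
--         A (list): An array representing the binary tree.
--         i (int): Index of the node for which to find the minimum child or grandchild.
--         n (int): The length of the heap.
--
--     Returns:
--         int: Index of the minimum child or grandchild of node i.
--     """
--     # Check if i is a valid index
--     if i >= n:
--         return None
--     # Calculate indices of left and right children of node i
--     left_child = leftChild(i)
--     right_child = rightChild(i)
--     # Initialize min_idx as i
--     min_idx = i
--     # Check if left child is smaller than min_val
--     if left_child < n:
--         left_idx = get_min_child(A, left_child, n)
--         if A[left_idx] < A[min_idx]:
--             min_idx = left_idx
--     # Check if right child is smaller than min_val
--     if right_child < n: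
--         right_idx = get_min_child(A, right_child, n)
--         if A[right_idx] < A[min_idx]:
--             min_idx = right_idx
--     return min_idx
-- ===== SOURCE B (Python) =====
-- def get_min_child(A, i, n):
--     # Iterative version: pre-order traversal of the subtree rooted at i via an
--     # explicit stack, then a single min() over the collected indices (first
--     # minimal index wins, matching the recursion's strict-< tie-break).
--     if i >= n:
--         return None
--     stack = [i]
--     idxs = []
--     while stack:
--         j = stack.pop()
--         idxs.append(j)
--         right = 2 * j + 2
--         if right < n:
--             stack.append(right)
--         left = 2 * j + 1
--         if left < n:
--             stack.append(left)
--     return min(idxs, key=lambda j: A[j])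
-- ===== Notes on version B (the rewrite author's own statement) =====
-- stated objective: alternative
-- what changed: Replaces A's recursive per-child comparisons with an explicit-stack pre-order traversal that collects the subtree's indices and a single first-wins min() over them.
-- outside the precondition, e.g. on get_min_child([], 5, 6): A returns 5, B raises IndexError; on get_min_child([0, 0], -1, 1): A raises RecursionError, B does not finish within the time limit
import Mathlib
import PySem

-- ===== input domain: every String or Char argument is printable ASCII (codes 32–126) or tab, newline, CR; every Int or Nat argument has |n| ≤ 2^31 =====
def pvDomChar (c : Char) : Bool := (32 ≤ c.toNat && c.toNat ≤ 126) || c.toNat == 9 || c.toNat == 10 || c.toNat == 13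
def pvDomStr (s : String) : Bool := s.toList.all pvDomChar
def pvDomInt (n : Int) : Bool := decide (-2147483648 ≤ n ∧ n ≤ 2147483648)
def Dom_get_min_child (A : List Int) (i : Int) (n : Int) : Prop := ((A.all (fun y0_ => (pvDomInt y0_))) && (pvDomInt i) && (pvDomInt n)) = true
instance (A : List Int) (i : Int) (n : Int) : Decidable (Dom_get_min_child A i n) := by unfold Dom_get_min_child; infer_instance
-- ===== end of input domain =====

-- B replaces A's recursive child-by-child comparisons with an explicit-stack pre-order
-- traversal collecting the subtree's indices followed by one first-wins min() pass (objective: alternative).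

-- ===== PORT A =====
-- A's recursion diverges for negative i < n, so the port carries a fuel counter
-- ((n-i).toNat+1 suffices on Pre_, proved below); fuel exhaustion returns none (unreachable on Pre_).
def leftChildA (i : Int) : Int := 2 * i + 1
def rightChildA (i : Int) : Int := 2 * i + 2
def getMinChildFuel (A : List Int) (n : Int) : Nat → Int → Option Int
  | 0, _ => none
  | f + 1, i =>
    if i ≥ n then none
    else
      let left_child := leftChildA i
      let right_child := rightChildA i
      let min_idx := i
      let min_idx :=
        if left_child < n then
          match getMinChildFuel A n f left_child with
          | some left_idx =>
              if PySem.List.pyGetD A left_idx 0 < PySem.List.pyGetD A min_idx 0 then left_idx else min_idx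
          | none => min_idx
        else min_idx
      let min_idx :=
        if right_child < n then
          match getMinChildFuel A n f right_child with
          | some right_idx =>
              if PySem.List.pyGetD A right_idx 0 < PySem.List.pyGetD A min_idx 0 then right_idx else min_idx
          | none => min_idx
        else min_idx
      some min_idx

def get_min_child (A : List Int) (i : Int) (n : Int) : Option Int :=
  getMinChildFuel A n ((n - i).toNat + 1) i

-- ===== PORT B =====
-- Python's min(idxs, key=lambda j: A[j]): first element, folded with strict-< replacement
def minStep (A : List Int) (m k : Int) : Int :=
  if PySem.List.pyGetD A k 0 < PySem.List.pyGetD A m 0 then k else m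

def minKeyFirst (A : List Int) : List Int → Option Int
  | [] => none
  | x :: rest => some (rest.foldl (minStep A) x)

-- B's while loop: pop j, record it, push right then left child.  The loop runs once per
-- subtree node, and the subtree of i has at most n.toNat nodes (proved below), so the
-- fuel counter n.toNat only makes the recursion structural; it is never exhausted on Pre_.
def stackLoopF (n : Int) : Nat → List Int → List Int → List Int
  | _, [], acc => acc
  | 0, _ :: _, acc => acc
  | f + 1, j :: rest, acc =>
    let st := if 2 * j + 2 < n then (2 * j + 2) :: rest else rest
    let st := if 2 * j + 1 < n then (2 * j + 1) :: st else st
    stackLoopF n f st (acc ++ [j])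

def get_min_child_alt (A : List Int) (i : Int) (n : Int) : Option Int :=
  if i ≥ n then none
  else minKeyFirst A (stackLoopF n n.toNat [i] [])

-- ===== PRECONDITION & SPEC =====
-- Pre_ excludes i < n with negative i (Python A recurses forever, RecursionError) and
-- n > len(A) (A's element accesses can raise IndexError; in the leaf corner where A
-- returns i without touching A at all, B's min(key=A[j]) still raises, so B raises
-- wherever these excluded inputs would make A return).
def Pre_get_min_child (A : List Int) (i : Int) (n : Int) : Prop :=
  i ≥ n ∨ (0 ≤ i ∧ n ≤ (A.length : Int))
instance (A : List Int) (i : Int) (n : Int) : Decidable (Pre_get_min_child A i n) := by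
  unfold Pre_get_min_child; infer_instance
def pvWitness_get_min_child : List Int × Int × Int := ([3, 1, 2, 5, 0], 0, 5)

def Spec_get_min_child (A : List Int) (i : Int) (n : Int) (out : Option Int) : Prop := out = get_min_child_alt A i n
instance (A : List Int) (i : Int) (n : Int) (out : Option Int) : Decidable (Spec_get_min_child A i n out) := by unfold Spec_get_min_child; infer_instance

-- ===== CLAIM (what is proved, stated in full; the proofs are below) =====
def Claim_equal_get_min_child : Prop := ∀ (A : List Int) (i : Int) (n : Int), Dom_get_min_child A i n → Pre_get_min_child A i n → Spec_get_min_child A i n (get_min_child A i n)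

-- ===== LEMMAS AND PROOFS =====

-- pre-order index list of the subtree rooted at i (proof-side device relating the two ports)
def preIdx (n : Int) (i : Int) : List Int :=
  if h : 0 ≤ i ∧ i < n then
    preIdx n (2 * i + 1) ++ preIdx n (2 * i + 2) |>.cons i
  else []
termination_by (n - i).toNat
decreasing_by all_goals omega

theorem preIdx_nil (n i : Int) (h : ¬ (0 ≤ i ∧ i < n)) : preIdx n i = [] := by
  rw [preIdx]; simp [h]

theorem preIdx_cons (n i : Int) (h : 0 ≤ i ∧ i < n) :
    preIdx n i = i :: (preIdx n (2 * i + 1) ++ preIdx n (2 * i + 2)) := by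
  rw [preIdx]; simp [h]

-- every subtree index lies in [i, n)
theorem mem_preIdx (n : Int) : ∀ (m : Nat) (i : Int), (n - i).toNat ≤ m → 0 ≤ i →
    ∀ x ∈ preIdx n i, i ≤ x ∧ x < n := by
  intro m
  induction m with
  | zero =>
    intro i hm h0 x hx
    rw [preIdx_nil n i (by omega)] at hx
    simp at hx
  | succ m ih =>
    intro i hm h0 x hx
    by_cases hi : i < n
    · rw [preIdx_cons n i ⟨h0, hi⟩] at hx
      simp at hx
      rcases hx with h | h | h
      · omega
      · have := ih (2 * i + 1) (by omega) (by omega) x h; omega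
      · have := ih (2 * i + 2) (by omega) (by omega) x h; omega
    · rw [preIdx_nil n i (by omega)] at hx
      simp at hx

-- every subtree index of i sits in a dyadic block [(i+1)*2^k - 1, (i+2)*2^k - 2]
theorem preIdx_interval (n : Int) : ∀ (m : Nat) (i : Int), (n - i).toNat ≤ m → 0 ≤ i →
    ∀ x ∈ preIdx n i, ∃ k : Nat, (i + 1) * 2 ^ k - 1 ≤ x ∧ x ≤ (i + 2) * 2 ^ k - 2 := by
  intro m
  induction m with
  | zero =>
    intro i hm h0 x hx
    rw [preIdx_nil n i (by omega)] at hx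
    simp at hx
  | succ m ih =>
    intro i hm h0 x hx
    by_cases hi : i < n
    · rw [preIdx_cons n i ⟨h0, hi⟩] at hx
      simp at hx
      rcases hx with h | h | h
      · exact ⟨0, by simp; omega⟩
      · obtain ⟨k, hk1, hk2⟩ := ih (2 * i + 1) (by omega) (by omega) x h
        have hpk : (0:Int) < 2 ^ k := by positivity
        refine ⟨k + 1, ?_, ?_⟩
        · have e : (i + 1) * 2 ^ (k + 1) = (2 * i + 1 + 1) * 2 ^ k := by ring
          linarith
        · have e : (i + 2) * 2 ^ (k + 1) = (2 * i + 1 + 2) * 2 ^ k + 2 ^ k := by ring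
          linarith
      · obtain ⟨k, hk1, hk2⟩ := ih (2 * i + 2) (by omega) (by omega) x h
        have hpk : (0:Int) < 2 ^ k := by positivity
        refine ⟨k + 1, ?_, ?_⟩
        · have e : (i + 1) * 2 ^ (k + 1) = (2 * i + 2 + 1) * 2 ^ k - 2 ^ k := by ring
          linarith
        · have e : (i + 2) * 2 ^ (k + 1) = (2 * i + 2 + 2) * 2 ^ k := by ring
          linarith
    · rw [preIdx_nil n i (by omega)] at hx
      simp at hx

-- the left and right subtrees are disjoint
theorem preIdx_disjoint (n i : Int) (h0 : 0 ≤ i) (x : Int)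
    (hl : x ∈ preIdx n (2 * i + 1)) (hr : x ∈ preIdx n (2 * i + 2)) : False := by
  obtain ⟨k, hk1, hk2⟩ := preIdx_interval n ((n - (2*i+1)).toNat) (2 * i + 1) le_rfl (by omega) x hl
  obtain ⟨m, hm1, hm2⟩ := preIdx_interval n ((n - (2*i+2)).toNat) (2 * i + 2) le_rfl (by omega) x hr
  rcases lt_trichotomy k m with hkm | hkm | hkm
  · obtain ⟨d, hd⟩ : ∃ d : Nat, m = k + (d + 1) := ⟨m - k - 1, by omega⟩
    subst hd
    have hpk : (1:Int) ≤ 2 ^ k := by exact_mod_cast Nat.one_le_two_pow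
    have hpd : (1:Int) ≤ 2 ^ d := by exact_mod_cast Nat.one_le_two_pow
    have e : (2:Int) ^ (k + (d + 1)) = 2 ^ k * (2 * 2 ^ d) := by ring
    have hA : (0:Int) ≤ (2 * i + 3) * 2 ^ k := mul_nonneg (by linarith) (by positivity)
    have h1 : (2 * i + 2 + 1) * 2 ^ (k + (d + 1)) ≥ 2 * ((2 * i + 3) * 2 ^ k) := by
      have e2 : (2 * i + 2 + 1) * 2 ^ (k + (d + 1)) = ((2 * i + 3) * 2 ^ k) * (2 * 2 ^ d) := by
        ring
      rw [e2]
      have := mul_le_mul_of_nonneg_left (show (2:Int) ≤ 2 * 2 ^ d by linarith) hA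
      linarith
    have h2 : (3:Int) ≤ (2 * i + 3) * 2 ^ k := by nlinarith
    have h3 : (2 * i + 1 + 2) * 2 ^ k = (2 * i + 3) * 2 ^ k := by ring
    linarith
  · subst hkm
    have h3 : (2 * i + 1 + 2) * 2 ^ k = (2 * i + 2 + 1) * 2 ^ k := by ring
    linarith
  · obtain ⟨d, hd⟩ : ∃ d : Nat, k = m + (d + 1) := ⟨k - m - 1, by omega⟩
    subst hd
    have hpm : (1:Int) ≤ 2 ^ m := by exact_mod_cast Nat.one_le_two_pow
    have hpd : (1:Int) ≤ 2 ^ d := by exact_mod_cast Nat.one_le_two_pow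
    have e : (2:Int) ^ (m + (d + 1)) = 2 ^ m * (2 * 2 ^ d) := by ring
    have hA : (0:Int) ≤ (2 * i + 2) * 2 ^ m := mul_nonneg (by linarith) (by positivity)
    have h1 : (2 * i + 1 + 1) * 2 ^ (m + (d + 1)) ≥ 2 * ((2 * i + 2) * 2 ^ m) := by
      have e2 : (2 * i + 1 + 1) * 2 ^ (m + (d + 1)) = ((2 * i + 2) * 2 ^ m) * (2 * 2 ^ d) := by
        ring
      rw [e2]
      have := mul_le_mul_of_nonneg_left (show (2:Int) ≤ 2 * 2 ^ d by linarith) hA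
      linarith
    have h2 : (2:Int) * 2 ^ m ≤ (2 * i + 2) * 2 ^ m := by nlinarith
    have h3 : (2 * i + 2 + 2) * 2 ^ m = (2 * i + 2) * 2 ^ m + 2 * 2 ^ m := by ring
    linarith

theorem preIdx_nodup (n : Int) : ∀ (m : Nat) (i : Int), (n - i).toNat ≤ m → 0 ≤ i →
    (preIdx n i).Nodup := by
  intro m
  induction m with
  | zero =>
    intro i hm h0
    rw [preIdx_nil n i (by omega)]
    exact List.nodup_nil
  | succ m ih =>
    intro i hm h0
    by_cases hi : i < n
    · rw [preIdx_cons n i ⟨h0, hi⟩]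
      refine List.Nodup.cons ?_ (List.Nodup.append ?_ ?_ ?_)
      · intro hmem
        simp at hmem
        rcases hmem with h | h
        · have := mem_preIdx n ((n - (2*i+1)).toNat) (2*i+1) le_rfl (by omega) i h; omega
        · have := mem_preIdx n ((n - (2*i+2)).toNat) (2*i+2) le_rfl (by omega) i h; omega
      · exact ih (2 * i + 1) (by omega) (by omega)
      · exact ih (2 * i + 2) (by omega) (by omega)
      · intro x hx hy
        exact preIdx_disjoint n i h0 x hx hy
    · rw [preIdx_nil n i (by omega)]
      exact List.nodup_nil

-- subtree size bound: at most (n - i).toNat nodes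
theorem preIdx_length_le (n i : Int) (h0 : 0 ≤ i) : (preIdx n i).length ≤ (n - i).toNat := by
  have nd := preIdx_nodup n ((n - i).toNat) i le_rfl h0
  have hsub : (preIdx n i).toFinset ⊆ Finset.Ico i n := by
    intro x hx
    rw [List.mem_toFinset] at hx
    have := mem_preIdx n ((n - i).toNat) i le_rfl h0 x hx
    simp [Finset.mem_Ico]
    omega
  have hcard := Finset.card_le_card hsub
  rw [Int.card_Ico] at hcard
  rwa [List.toFinset_card_of_nodup nd] at hcard

-- minStep is associative (first-min by key)
theorem minStep_assoc (A : List Int) (m x c : Int) :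
    minStep A (minStep A m x) c = minStep A m (minStep A x c) := by
  unfold minStep
  split_ifs <;> first | rfl | omega

-- folding from m over a nonempty list = one step with the list's own first-min
theorem foldl_minStep_cons (A : List Int) : ∀ (l : List Int) (m x : Int),
    (x :: l).foldl (minStep A) m = minStep A m (l.foldl (minStep A) x) := by
  intro l
  induction l with
  | nil => intro m x; simp [List.foldl]
  | cons y l ih =>
    intro m x
    simp only [List.foldl]
    have h1 := ih (minStep A m x) y
    have h2 := ih x y
    simp only [List.foldl] at h1 h2
    rw [h1, h2, minStep_assoc]

-- A's fuelled recursion computes the first-min of the pre-order index list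
theorem aFuel_char (A : List Int) (n : Int) : ∀ (f : Nat) (i : Int), 0 ≤ i →
    (n - i).toNat ≤ f → getMinChildFuel A n f i = minKeyFirst A (preIdx n i) := by
  intro f
  induction f with
  | zero =>
    intro i h0 hf
    have : ¬ (0 ≤ i ∧ i < n) := by omega
    rw [preIdx_nil n i this]
    rfl
  | succ f ih =>
    intro i h0 hf
    by_cases hn : i ≥ n
    · rw [preIdx_nil n i (by omega)]
      simp [getMinChildFuel, hn, minKeyFirst]
    · have hlt : i < n := by omega
      rw [preIdx_cons n i ⟨h0, hlt⟩]
      simp only [getMinChildFuel, hn, ite_false, leftChildA, rightChildA]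
      set L1 := preIdx n (2 * i + 1) with hL1
      set L2 := preIdx n (2 * i + 2) with hL2
      simp only [minKeyFirst, List.foldl_append]
      have hmin1 : (if 2 * i + 1 < n then
            match getMinChildFuel A n f (2 * i + 1) with
            | some left_idx =>
                if PySem.List.pyGetD A left_idx 0 < PySem.List.pyGetD A i 0 then left_idx else i
            | none => i
          else i) = L1.foldl (minStep A) i := by
        by_cases h1 : 2 * i + 1 < n
        · have hc := ih (2 * i + 1) (by omega) (by omega)
          rw [preIdx_cons n (2 * i + 1) ⟨by omega, h1⟩] at hc
          simp only [minKeyFirst] at hc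
          rw [hL1, preIdx_cons n (2 * i + 1) ⟨by omega, h1⟩, foldl_minStep_cons, if_pos h1, hc]
          unfold minStep
          rfl
        · rw [hL1, preIdx_nil n (2 * i + 1) (by omega), if_neg h1]
          rfl
      rw [hmin1]
      set m1 := L1.foldl (minStep A) i with hm1
      by_cases h2 : 2 * i + 2 < n
      · have hc := ih (2 * i + 2) (by omega) (by omega)
        rw [preIdx_cons n (2 * i + 2) ⟨by omega, h2⟩] at hc
        simp only [minKeyFirst] at hc
        rw [hL2, preIdx_cons n (2 * i + 2) ⟨by omega, h2⟩, foldl_minStep_cons, if_pos h2, hc]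
        unfold minStep
        rfl
      · rw [hL2, preIdx_nil n (2 * i + 2) (by omega), if_neg h2]
        rfl

-- B's stack loop appends the pre-order lists of all stack entries (fuel ≥ total node count)
theorem stackLoopF_char (n : Int) : ∀ (f : Nat) (st acc : List Int),
    (st.map (fun j => (preIdx n j).length)).sum ≤ f →
    (∀ j ∈ st, 0 ≤ j ∧ j < n) →
    stackLoopF n f st acc = acc ++ st.flatMap (preIdx n) := by
  intro f
  induction f with
  | zero =>
    intro st acc hm hv
    match st with
    | [] => simp [stackLoopF]
    | j :: rest =>
      exfalso
      have hj := hv j (by simp)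
      have : preIdx n j = j :: (preIdx n (2 * j + 1) ++ preIdx n (2 * j + 2)) :=
        preIdx_cons n j hj
      simp [this] at hm
  | succ f ih =>
    intro st acc hm hv
    match st with
    | [] => simp [stackLoopF]
    | j :: rest =>
      have hj := hv j (by simp)
      rw [stackLoopF]
      have hpre := preIdx_cons n j hj
      by_cases h1 : 2 * j + 1 < n <;> by_cases h2 : 2 * j + 2 < n
      · rw [if_pos h2, if_pos h1,
          ih ((2 * j + 1) :: (2 * j + 2) :: rest) (acc ++ [j])
            (by simp at hm ⊢; simp [hpre] at hm; omega)
            (by intro x hx; simp at hx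
                rcases hx with h | h | h
                · exact ⟨by omega, by omega⟩
                · exact ⟨by omega, by omega⟩
                · exact hv x (by simp [h]))]
        simp [hpre]
      · have e2 : preIdx n (2 * j + 2) = [] := preIdx_nil n _ (by omega)
        rw [if_neg h2, if_pos h1,
          ih ((2 * j + 1) :: rest) (acc ++ [j])
            (by simp at hm ⊢; simp [hpre, e2] at hm; omega)
            (by intro x hx; simp at hx
                rcases hx with h | h
                · exact ⟨by omega, by omega⟩
                · exact hv x (by simp [h]))]
        simp [hpre, e2]
      · have e1 : preIdx n (2 * j + 1) = [] := preIdx_nil n _ (by omega)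
        rw [if_pos h2, if_neg h1,
          ih ((2 * j + 2) :: rest) (acc ++ [j])
            (by simp at hm ⊢; simp [hpre, e1] at hm; omega)
            (by intro x hx; simp at hx
                rcases hx with h | h
                · exact ⟨by omega, by omega⟩
                · exact hv x (by simp [h]))]
        simp [hpre, e1]
      · have e1 : preIdx n (2 * j + 1) = [] := preIdx_nil n _ (by omega)
        have e2 : preIdx n (2 * j + 2) = [] := preIdx_nil n _ (by omega)
        rw [if_neg h2, if_neg h1,
          ih rest (acc ++ [j])
            (by simp at hm ⊢; simp [hpre, e1, e2] at hm; omega)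
            (fun x hx => hv x (by simp [hx]))]
        simp [hpre, e1, e2]

-- ===== VERDICT (by name: the statement is the Claim_ definition above) =====
theorem get_min_child_spec : Claim_equal_get_min_child := by
  intro A i n _ hpre
  unfold Spec_get_min_child get_min_child get_min_child_alt
  by_cases hn : i ≥ n
  · rw [if_pos hn]
    have : (n - i).toNat = 0 := by omega
    rw [this]
    simp [getMinChildFuel, hn]
  · have h0 : 0 ≤ i := by
      rcases hpre with h | h
      · exact absurd h hn
      · exact h.1
    rw [if_neg hn, aFuel_char A n ((n - i).toNat + 1) i h0 (by omega),
        stackLoopF_char n n.toNat [i] []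
          (by simpa using le_trans (preIdx_length_le n i h0) (by omega))
          (by intro x hx; simp at hx; subst hx; exact ⟨h0, by omega⟩)]
    simp
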